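-- pv_equiv track=rewrite | github.com/dim-s/ast-outline | src/code_outline/adapters/csharp.py | _strip_leading_attrs
-- ===== SOURCE A (Python) =====
-- def _strip_leading_attrs(text: str) -> str:
--     s = text.lstrip()
--     while s.startswith("["):
--         depth = 0
--         i = 0
--         while i < len(s):
--             if s[i] == "[":
--                 depth += 1
--             elif s[i] == "]":
--                 depth -= 1
--                 if depth == 0:
--                     i += 1
--                     break
--             i += 1
--         s = s[i:].lstrip()
--     return s
-- ===== SOURCE B (Python) =====
-- def _strip_leading_attrs(text: str) -> str:
--     s = text
--     n = len(s)
--     i = 0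
--     while i < n and s[i].isspace():
--         i += 1
--     depth = 0
--     while i < n:
--         c = s[i]
--         if depth == 0:
--             if c != '[':
--                 break
--             depth = 1
--             i += 1
--         else:
--             if c == '[':
--                 depth += 1
--             elif c == ']':
--                 depth -= 1
--             i += 1
--             if depth == 0:
--                 while i < n and s[i].isspace():
--                     i += 1
--     return s[i:]
-- ===== Notes on version B (the rewrite author's own statement) =====
-- stated objective: simpler
-- what changed: Replaces A's outer loop of repeated slicing (s = s[i:].lstrip()) with a single index cursor walked once over the original string (skip whitespace, scan a bracket block by depth, repeat), so no intermediate substrings are built and s[i:] is taken once at the end.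
import Mathlib
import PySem

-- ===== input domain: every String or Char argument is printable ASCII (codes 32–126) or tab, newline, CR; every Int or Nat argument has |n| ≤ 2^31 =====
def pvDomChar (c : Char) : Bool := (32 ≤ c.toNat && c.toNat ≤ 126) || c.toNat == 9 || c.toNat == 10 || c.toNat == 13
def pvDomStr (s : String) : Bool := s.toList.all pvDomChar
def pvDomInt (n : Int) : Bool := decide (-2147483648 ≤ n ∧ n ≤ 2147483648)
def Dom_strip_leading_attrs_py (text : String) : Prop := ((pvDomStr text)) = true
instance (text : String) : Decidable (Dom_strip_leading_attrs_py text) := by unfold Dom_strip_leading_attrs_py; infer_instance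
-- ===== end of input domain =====

-- B replaces A's outer loop of repeated slicing + re-lstrip with a single index cursor
-- walked once over the original string (objective: simpler — no intermediate substrings).
-- (Loops are ported with a structural fuel argument that exactly covers the remaining
-- positions, so each Go-function at its wrapper's fuel IS the Python while loop.)

-- ===== PORT A =====
-- inner 'while i < len(s)' scan of A (fuel = s.length - i positions left): returns the final i
def innerAGo : Nat → List Char → Int → Nat → Nat
  | 0, _, _, i => i
  | fuel + 1, s, depth, i =>
    if h : i < s.length then
      if s[i] = '[' then innerAGo fuel s (depth + 1) (i + 1)
      else if s[i] = ']' then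
        if depth - 1 = 0 then i + 1 else innerAGo fuel s (depth - 1) (i + 1)
      else innerAGo fuel s depth (i + 1)
    else i

def innerA (s : List Char) (depth : Int) (i : Nat) : Nat := innerAGo (s.length - i) s depth i

-- outer 'while s.startswith("[")' loop of A (each pass strips ≥ 1 char, so fuel = s.length)
def loopAGo : Nat → List Char → List Char
  | 0, s => s
  | fuel + 1, s =>
    if PySem.Chars.startswith s ['['] = true then
      loopAGo fuel (PySem.Chars.lstrip (s.drop (innerA s 0 0)))
    else s

def loopA (s : List Char) : List Char := loopAGo s.length s

def strip_leading_attrs_py (text : String) : String :=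
  String.ofList (loopA (PySem.Chars.lstrip text.toList))

-- ===== PORT B =====
-- 'while i < n and s[i].isspace(): i += 1'
def skipWsGo : Nat → List Char → Nat → Nat
  | 0, _, i => i
  | fuel + 1, s, i =>
    if h : i < s.length then
      if PySem.Chars.isspace s[i] then skipWsGo fuel s (i + 1) else i
    else i

def skipWs (s : List Char) (i : Nat) : Nat := skipWsGo (s.length - i) s i

-- single cursor loop of B (the cursor advances every pass, so fuel = s.length - i)
def loopBGo : Nat → List Char → Nat → Int → Nat
  | 0, _, i, _ => i
  | fuel + 1, s, i, depth =>
    if h : i < s.length then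
      if depth = 0 then
        if s[i] ≠ '[' then i else loopBGo fuel s (i + 1) 1
      else
        let depth' := if s[i] = '[' then depth + 1
                      else if s[i] = ']' then depth - 1 else depth
        if depth' = 0 then loopBGo fuel s (skipWs s (i + 1)) 0
        else loopBGo fuel s (i + 1) depth'
    else i

def loopB (s : List Char) (i : Nat) (depth : Int) : Nat := loopBGo (s.length - i) s i depth

def strip_leading_attrs_py_alt (text : String) : String :=
  String.ofList ((text.toList).drop (loopB text.toList (skipWs text.toList 0) 0))

-- ===== PRECONDITION & SPEC =====
def Spec_strip_leading_attrs_py (text : String) (out : String) : Prop := out = strip_leading_attrs_py_alt text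
instance (text : String) (out : String) : Decidable (Spec_strip_leading_attrs_py text out) := by unfold Spec_strip_leading_attrs_py; infer_instance

-- ===== CLAIM (what is proved, stated in full; the proofs are below) =====
def Claim_equal_strip_leading_attrs_py : Prop := ∀ (text : String), Dom_strip_leading_attrs_py text → Spec_strip_leading_attrs_py text (strip_leading_attrs_py text)

-- ===== LEMMAS AND PROOFS =====

-- the wrappers satisfy their loops' unfolding equations
theorem skipWs_unfold (s : List Char) (i : Nat) :
    skipWs s i = if _ : i < s.length then
        (if PySem.Chars.isspace s[i] then skipWs s (i + 1) else i)
      else i := by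
  unfold skipWs
  by_cases h : i < s.length
  · have hf : s.length - i = (s.length - (i + 1)) + 1 := by omega
    rw [hf]
    simp [skipWsGo, h]
  · have hf : s.length - i = 0 := by omega
    rw [hf]
    simp [skipWsGo, h]

theorem innerA_unfold (s : List Char) (depth : Int) (i : Nat) :
    innerA s depth i = if _ : i < s.length then
        (if s[i] = '[' then innerA s (depth + 1) (i + 1)
         else if s[i] = ']' then
           if depth - 1 = 0 then i + 1 else innerA s (depth - 1) (i + 1)
         else innerA s depth (i + 1))
      else i := by
  unfold innerA
  by_cases h : i < s.length
  · have hf : s.length - i = (s.length - (i + 1)) + 1 := by omega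
    rw [hf]
    simp [innerAGo, h]
  · have hf : s.length - i = 0 := by omega
    rw [hf]
    simp [innerAGo, h]

theorem le_innerAGo (fuel : Nat) (s : List Char) (depth : Int) (i : Nat) :
    i ≤ innerAGo fuel s depth i := by
  induction fuel generalizing depth i with
  | zero => exact le_refl i
  | succ fuel ih =>
    simp only [innerAGo]
    split
    · split
      · exact le_trans (Nat.le_succ i) (ih (depth + 1) (i + 1))
      · split
        · split
          · exact Nat.le_succ i
          · exact le_trans (Nat.le_succ i) (ih (depth - 1) (i + 1))
        · exact le_trans (Nat.le_succ i) (ih depth (i + 1))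
    · exact le_refl i

theorem le_innerA (s : List Char) (depth : Int) (i : Nat) : i ≤ innerA s depth i :=
  le_innerAGo _ s depth i

theorem le_skipWsGo (fuel : Nat) (s : List Char) (i : Nat) : i ≤ skipWsGo fuel s i := by
  induction fuel generalizing i with
  | zero => exact le_refl i
  | succ fuel ih =>
    simp only [skipWsGo]
    split
    · split
      · exact le_trans (Nat.le_succ i) (ih (i + 1))
      · exact le_refl i
    · exact le_refl i

theorem le_skipWs (s : List Char) (i : Nat) : i ≤ skipWs s i := le_skipWsGo _ s i

-- loopBGo is fuel-irrelevant once the fuel covers the remaining positions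
theorem loopBGo_eq (fuel fuel' : Nat) (s : List Char) (i : Nat) (depth : Int)
    (h1 : s.length - i ≤ fuel) (h2 : s.length - i ≤ fuel') :
    loopBGo fuel s i depth = loopBGo fuel' s i depth := by
  induction fuel generalizing fuel' i depth with
  | zero =>
    have h : ¬ i < s.length := by omega
    cases fuel' with
    | zero => rfl
    | succ fuel' => simp [loopBGo, h]
  | succ fuel ih =>
    cases fuel' with
    | zero =>
      have h : ¬ i < s.length := by omega
      simp [loopBGo, h]
    | succ fuel' =>
      simp only [loopBGo]
      split_ifs
      all_goals first
        | rfl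
        | exact ih fuel' (i + 1) 1 (by omega) (by omega)
        | exact ih fuel' (skipWs s (i + 1)) 0
            (by have := le_skipWs s (i + 1); omega) (by have := le_skipWs s (i + 1); omega)
        | exact ih fuel' (i + 1) _ (by omega) (by omega)

theorem loopB_unfold (s : List Char) (i : Nat) (depth : Int) :
    loopB s i depth = if _ : i < s.length then
        (if depth = 0 then
          (if s[i] ≠ '[' then i else loopB s (i + 1) 1)
        else
          (let depth' := if s[i] = '[' then depth + 1
                         else if s[i] = ']' then depth - 1 else depth
           if depth' = 0 then loopB s (skipWs s (i + 1)) 0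
           else loopB s (i + 1) depth'))
      else i := by
  unfold loopB
  by_cases h : i < s.length
  · have hf : s.length - i = (s.length - (i + 1)) + 1 := by omega
    rw [hf]
    simp only [loopBGo, h, dif_pos]
    have e1 : loopBGo (s.length - (i + 1)) s (i + 1) 1 = loopBGo (s.length - (i + 1)) s (i + 1) 1 := rfl
    have e2 : loopBGo (s.length - (i + 1)) s (skipWs s (i + 1)) 0
        = loopBGo (s.length - skipWs s (i + 1)) s (skipWs s (i + 1)) 0 := by
      have := le_skipWs s (i + 1)
      exact loopBGo_eq _ _ s _ 0 (by omega) (by omega)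
    rw [e2]
  · have hf : s.length - i = 0 := by omega
    rw [hf]
    simp [loopBGo, h]

-- loopAGo is fuel-irrelevant once the fuel covers the list's length
theorem loopAGo_eq (fuel fuel' : Nat) (s : List Char) (h1 : s.length ≤ fuel) (h2 : s.length ≤ fuel') :
    loopAGo fuel s = loopAGo fuel' s := by
  induction fuel generalizing fuel' s with
  | zero =>
    have hnil : s = [] := List.eq_nil_of_length_eq_zero (by omega)
    subst hnil
    cases fuel' with
    | zero => rfl
    | succ fuel' => simp [loopAGo, PySem.Chars.startswith]
  | succ fuel ih =>
    cases fuel' with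
    | zero =>
      have hnil : s = [] := List.eq_nil_of_length_eq_zero (by omega)
      subst hnil
      simp [loopAGo, PySem.Chars.startswith]
    | succ fuel' =>
      simp only [loopAGo]
      split
      · rename_i h
        have hj1 : 1 ≤ innerA s 0 0 := by
          rcases s with _ | ⟨c, t⟩
          · simp [PySem.Chars.startswith] at h
          · have hc : c = '[' := by
              have := (PySem.Chars.startswith_iff (c :: t) ['[']).mp h
              rcases List.cons_prefix_cons.mp this with ⟨h', _⟩
              exact h'.symm
            have he : innerA (c :: t) 0 0 = innerA (c :: t) 1 1 := by
              rw [innerA_unfold]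
              simp [hc]
            rw [he]
            exact le_innerA _ _ _
        have hlen : (PySem.Chars.lstrip (s.drop (innerA s 0 0))).length ≤ s.length - 1 := by
          have ha : (PySem.Chars.lstrip (s.drop (innerA s 0 0))).length ≤ (s.drop (innerA s 0 0)).length :=
            List.length_dropWhile_le ..
          rw [List.length_drop] at ha
          omega
        exact ih fuel' _ (by omega) (by omega)
      · rfl

theorem loopA_unfold (s : List Char) :
    loopA s = if PySem.Chars.startswith s ['['] = true then
        loopA (PySem.Chars.lstrip (s.drop (innerA s 0 0)))
      else s := by
  unfold loopA
  by_cases h : PySem.Chars.startswith s ['['] = true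
  · have hne : s ≠ [] := by
      intro hs; subst hs; simp [PySem.Chars.startswith] at h
    have hpos : 0 < s.length := List.length_pos_iff.mpr hne
    have hf : s.length = (s.length - 1) + 1 := by omega
    rw [hf]
    simp only [loopAGo, h, if_pos]
    have hlen : (PySem.Chars.lstrip (s.drop (innerA s 0 0))).length ≤ s.length - 1 := by
      have hj1 : 1 ≤ innerA s 0 0 := by
        rcases s with _ | ⟨c, t⟩
        · simp [PySem.Chars.startswith] at h
        · have hc : c = '[' := by
            have := (PySem.Chars.startswith_iff (c :: t) ['[']).mp h
            rcases List.cons_prefix_cons.mp this with ⟨h', _⟩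
            exact h'.symm
          have he : innerA (c :: t) 0 0 = innerA (c :: t) 1 1 := by
            rw [innerA_unfold]
            simp [hc]
          rw [he]
          exact le_innerA _ _ _
      have ha : (PySem.Chars.lstrip (s.drop (innerA s 0 0))).length ≤ (s.drop (innerA s 0 0)).length :=
        List.length_dropWhile_le ..
      rw [List.length_drop] at ha
      omega
    exact loopAGo_eq _ _ _ (by omega) (by omega)
  · rw [if_neg h]
    cases hsl : s.length with
    | zero => rfl
    | succ n => simp [loopAGo, h]

-- skipWs stops exactly where dropWhile isspace stops
theorem drop_skipWsGo (fuel : Nat) (s : List Char) (i : Nat) (hfuel : s.length - i ≤ fuel) :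
    s.drop (skipWsGo fuel s i) = (s.drop i).dropWhile PySem.Chars.isspace := by
  induction fuel generalizing i with
  | zero =>
    have h1 : s.drop i = [] := List.drop_eq_nil_of_le (by omega)
    simp [skipWsGo, h1]
  | succ fuel ih =>
    simp only [skipWsGo]
    split
    · rename_i h
      have hd : s.drop i = s[i] :: s.drop (i + 1) := List.drop_eq_getElem_cons h
      split
      · rename_i hsp
        rw [ih (i + 1) (by omega), hd, List.dropWhile_cons_of_pos hsp]
      · rename_i hsp
        rw [hd, List.dropWhile_cons_of_neg hsp, ← hd]
    · rename_i h
      have h1 : s.drop i = [] := List.drop_eq_nil_of_le (by omega)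
      rw [h1]; rfl

theorem drop_skipWs (s : List Char) (i : Nat) :
    s.drop (skipWs s i) = (s.drop i).dropWhile PySem.Chars.isspace :=
  drop_skipWsGo _ s i (le_refl _)

-- innerA over a dropped suffix = innerA over the whole string at a shifted index
theorem innerA_shift (s : List Char) (i0 : Nat) (d : Int) (k : Nat) :
    innerA s d (i0 + k) = i0 + innerA (s.drop i0) d k := by
  by_cases h : k < (s.drop i0).length
  · have hlen : i0 + k < s.length := by
      rw [List.length_drop] at h; omega
    have hget : (s.drop i0)[k] = s[i0 + k] := by
      rw [List.getElem_drop]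
    conv_lhs => rw [innerA_unfold]
    conv_rhs => rw [innerA_unfold]
    simp only [hlen, h, dif_pos, hget]
    split
    · have := innerA_shift s i0 (d + 1) (k + 1); omega
    · split
      · split
        · omega
        · have := innerA_shift s i0 (d - 1) (k + 1); omega
      · have := innerA_shift s i0 d (k + 1); omega
  · have hlen : ¬ i0 + k < s.length := by
      rw [List.length_drop] at h; omega
    have e1 : innerA s d (i0 + k) = i0 + k := by rw [innerA_unfold, dif_neg hlen]
    have e2 : innerA (s.drop i0) d k = k := by rw [innerA_unfold, dif_neg h]
    omega
termination_by (s.drop i0).length - k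
decreasing_by
  · rw [List.length_drop] at *; omega
  · rw [List.length_drop] at *; omega
  · rw [List.length_drop] at *; omega

-- B's depth ≥ 1 phase follows A's inner scan exactly
theorem inner_agree (s : List Char) (i : Nat) (d : Int) (hd : 1 ≤ d) :
    loopB s i d = loopB s (skipWs s (innerA s d i)) 0 := by
  by_cases h : i < s.length
  · conv_lhs => rw [loopB_unfold]
    conv_rhs => rw [innerA_unfold]
    simp only [h, dif_pos]
    have hne : ¬ d = 0 := by omega
    simp only [hne, if_false]
    by_cases hb : s[i] = '['
    · simp only [hb, if_pos]
      have : ¬ d + 1 = 0 := by omega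
      simp only [this, if_false]
      exact inner_agree s (i + 1) (d + 1) (by omega)
    · by_cases hc : s[i] = ']'
      · by_cases h1 : d - 1 = 0
        · simp [hc, h1]
        · simp [hc, h1]
          exact inner_agree s (i + 1) (d - 1) (by omega)
      · simp only [hb, hc, if_false]
        simp only [hne, if_false]
        exact inner_agree s (i + 1) d hd
  · have h1 : skipWs s i = i := by rw [skipWs_unfold]; simp [h]
    have h2 : innerA s d i = i := by rw [innerA_unfold]; simp [h]
    rw [h2, h1]
    conv_lhs => rw [loopB_unfold]
    conv_rhs => rw [loopB_unfold]
    simp [h]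
termination_by s.length - i

-- main correspondence: B's cursor loop from a whitespace-normal position computes A's loop
theorem main_agree (n : Nat) (s : List Char) (i : Nat) (hn : s.length - i ≤ n)
    (hws : (s.drop i).dropWhile PySem.Chars.isspace = s.drop i) :
    s.drop (loopB s i 0) = loopA (s.drop i) := by
  induction n generalizing i with
  | zero =>
    have h : ¬ i < s.length := by omega
    rw [loopB_unfold]; simp only [h, dif_neg, not_false_iff]
    have h1 : s.drop i = [] := List.drop_eq_nil_of_le (by omega)
    rw [h1, loopA_unfold]; simp [PySem.Chars.startswith]
  | succ n ih =>
    by_cases h : i < s.length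
    · have hd : s.drop i = s[i] :: s.drop (i + 1) := List.drop_eq_getElem_cons h
      by_cases hb : s[i] = '['
      · -- attribute block: follow A's inner scan then skip whitespace
        have hB : loopB s i 0 = loopB s (skipWs s (innerA s 1 (i + 1))) 0 := by
          conv_lhs => rw [loopB_unfold]
          simp only [h, dif_pos, hb, ne_eq, not_true_eq_false, if_false]
          exact inner_agree s (i + 1) 1 (by omega)
        have hj : innerA (s.drop i) 0 0 = innerA (s.drop i) 1 1 := by
          have h0 : 0 < (s.drop i).length := by rw [List.length_drop]; omega
          have hg : (s.drop i)[0] = s[i] := by simp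
          conv_lhs => rw [innerA_unfold]
          simp [hg, hb]
          exact fun hle => absurd hle (by omega)
        set j := innerA (s.drop i) 1 1 with hjdef
        have hshift : innerA s 1 (i + 1) = i + j := by
          have := innerA_shift s i 1 1
          omega
        have hj1 : 1 ≤ j := le_innerA _ _ _
        set i' := skipWs s (i + j) with hi'def
        have hi'ge : i + j ≤ i' := le_skipWs s (i + j)
        have hA : loopA (s.drop i) = loopA (PySem.Chars.lstrip ((s.drop i).drop (innerA (s.drop i) 0 0))) := by
          rw [loopA_unfold]
          have hsw : PySem.Chars.startswith (s.drop i) ['['] = true := by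
            rw [hd]
            exact (PySem.Chars.startswith_iff _ _).mpr (List.cons_prefix_cons.mpr ⟨hb.symm, List.nil_prefix⟩)
          simp [hsw]
        have hdrop : (s.drop i).drop (innerA (s.drop i) 0 0) = s.drop (i + j) := by
          rw [hj, List.drop_drop]
        have hfix : s.drop i' = (s.drop (i + j)).dropWhile PySem.Chars.isspace := drop_skipWs s (i + j)
        have hlstrip : PySem.Chars.lstrip (s.drop (i + j)) = s.drop i' := hfix.symm
        have hws' : (s.drop i').dropWhile PySem.Chars.isspace = s.drop i' := by
          rw [hfix]
          exact List.dropWhile_idempotent ..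
        rw [hshift] at hB
        rw [hB, hA, hdrop, hlstrip]
        exact ih i' (by omega) hws'
      · -- no attribute: both stop here
        have hB : loopB s i 0 = i := by
          rw [loopB_unfold]; simp [h, hb]
        have hA : loopA (s.drop i) = s.drop i := by
          rw [loopA_unfold]
          have hsw : ¬ PySem.Chars.startswith (s.drop i) ['['] = true := by
            intro hsw
            have := (PySem.Chars.startswith_iff _ _).mp hsw
            rw [hd] at this
            exact hb (List.cons_prefix_cons.mp this).1.symm
          simp [hsw]
        rw [hB, hA]
    · rw [loopB_unfold]; simp only [h, dif_neg, not_false_iff]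
      have h1 : s.drop i = [] := List.drop_eq_nil_of_le (by omega)
      rw [h1, loopA_unfold]; simp [PySem.Chars.startswith]

-- ===== VERDICT (by name: the statement is the Claim_ definition above) =====
theorem strip_leading_attrs_py_spec : Claim_equal_strip_leading_attrs_py := by
  intro text _
  unfold Spec_strip_leading_attrs_py strip_leading_attrs_py strip_leading_attrs_py_alt
  set s := text.toList
  set i0 := skipWs s 0 with hi0
  have hfix0 : s.drop i0 = (s.drop 0).dropWhile PySem.Chars.isspace := drop_skipWs s 0
  have hws : (s.drop i0).dropWhile PySem.Chars.isspace = s.drop i0 := by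
    rw [hfix0]
    exact List.dropWhile_idempotent ..
  have h := main_agree s.length s i0 (by omega) hws
  have hl : PySem.Chars.lstrip s = s.drop i0 := by
    show s.dropWhile PySem.Chars.isspace = s.drop i0
    rw [hfix0]; simp
  rw [hl, ← h]
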